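-- pv_equiv track=rewrite | github.com/titomoes/Projetos-Python-Django | lista08/lista08_lista01_questao02.py | imprimir
-- ===== SOURCE A (Python) =====
-- def imprimir(n):
--     res = ""
--     c = 1
--     for i in range(n+1):
--         #res += str(i + 1) + "\n"
--         for j in range(i):
--             res += str(j+1) + " "
--         res += "\n"
--     return res
-- ===== SOURCE B (Python) =====
-- def imprimir(n):
--     parts = []
--     current = ""
--     for i in range(n + 1):
--         if i > 0:
--             current += str(i) + " "
--         parts.append(current + "\n")
--     return "".join(parts)
-- ===== Notes on version B (the rewrite author's own statement) =====
-- stated objective: alternative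
-- what changed: B keeps one running prefix string extended by one token per row and joins the collected rows once at the end, instead of A's inner loop that rebuilds every row token by token.
import Mathlib
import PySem

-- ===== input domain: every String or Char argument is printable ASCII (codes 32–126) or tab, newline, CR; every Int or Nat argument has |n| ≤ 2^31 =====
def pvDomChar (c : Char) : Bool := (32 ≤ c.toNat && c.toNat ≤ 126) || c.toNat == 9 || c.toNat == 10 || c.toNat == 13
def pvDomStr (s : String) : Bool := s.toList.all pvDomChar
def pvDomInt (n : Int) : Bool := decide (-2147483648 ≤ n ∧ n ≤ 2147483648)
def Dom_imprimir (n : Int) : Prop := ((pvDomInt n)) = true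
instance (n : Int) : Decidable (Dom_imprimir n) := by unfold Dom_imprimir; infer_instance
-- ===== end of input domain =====

-- B builds each row from the previous one with a single running prefix and joins the rows
-- once at the end, instead of A's nested loops recomputing every row from scratch
-- (objective: alternative decomposition, one pass instead of two).

-- ===== PORT A =====
def imprimir (n : Int) : String :=
  (PySem.List.pyRange 0 (n + 1)).foldl
    (fun res i =>
      ((PySem.List.pyRange 0 i).foldl
        (fun r j => r ++ (PySem.Int.toStr (j + 1) ++ " ")) res) ++ "\n")
    ""

-- ===== PORT B =====
def imprimir_alt (n : Int) : String :=
  let st := (PySem.List.pyRange 0 (n + 1)).foldl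
    (fun (st : String × List String) i =>
      let cur := if 0 < i then st.1 ++ (PySem.Int.toStr i ++ " ") else st.1
      (cur, st.2 ++ [cur ++ "\n"]))
    ("", [])
  PySem.Str.join "" st.2

-- ===== PRECONDITION & SPEC =====
def Spec_imprimir (n : Int) (out : String) : Prop := out = imprimir_alt n
instance (n : Int) (out : String) : Decidable (Spec_imprimir n out) := by unfold Spec_imprimir; infer_instance

-- ===== CLAIM (what is proved, stated in full; the proofs are below) =====
def Claim_equal_imprimir : Prop := ∀ (n : Int), Dom_imprimir n → Spec_imprimir n (imprimir n)

-- ===== LEMMAS AND PROOFS =====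

-- "".join with empty separator, cons step
theorem join0_nil : PySem.Str.join "" [] = "" := by decide

theorem join0_cons (s : String) (l : List String) :
    PySem.Str.join "" (s :: l) = s ++ PySem.Str.join "" l := by
  apply String.toList_inj.mp
  cases l <;> simp [PySem.Str.toList_join, PySem.Chars.join, List.intercalate]

theorem join0_append (xs ys : List String) :
    PySem.Str.join "" (xs ++ ys) = PySem.Str.join "" xs ++ PySem.Str.join "" ys := by
  induction xs with
  | nil => simp [join0_nil]
  | cons a t ih => simp [join0_cons, ih, String.append_assoc]

-- a string-accumulating fold is the initial value followed by the join of the pieces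
theorem foldl_strglue {α : Type} (l : List α) (g : α → String) (init : String) :
    l.foldl (fun r x => r ++ g x) init = init ++ PySem.Str.join "" (l.map g) := by
  induction l generalizing init with
  | nil => simp [join0_nil]
  | cons a t ih => simp [List.foldl_cons, ih, join0_cons, String.append_assoc]

-- row i = "1 2 … i " (A's inner loop starting from "")
def pvRow (i : Int) : String :=
  PySem.Str.join "" ((PySem.List.pyRange 0 i).map (fun j => PySem.Int.toStr (j + 1) ++ " "))

theorem pvRow_succ (i : Int) (h : 0 < i) :
    pvRow i = pvRow (i - 1) ++ (PySem.Int.toStr i ++ " ") := by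
  unfold pvRow
  have : PySem.List.pyRange 0 i = PySem.List.pyRange 0 (i - 1) ++ [i - 1] := by
    have := PySem.List.pyRange_one_succ_right (a := 0) (b := i - 1) (by omega)
    simpa [sub_add_cancel] using this
  rw [this]
  simp [join0_append, join0_cons, join0_nil, sub_add_cancel]

-- A as a join of rows
theorem imprimir_eq_join (n : Int) :
    imprimir n = PySem.Str.join ""
      ((PySem.List.pyRange 0 (n + 1)).map (fun i => pvRow i ++ "\n")) := by
  unfold imprimir
  have hext := List.foldl_ext
      (fun res i => (PySem.List.pyRange 0 i).foldl
        (fun r j => r ++ (PySem.Int.toStr (j + 1) ++ " ")) res ++ "\n")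
      (fun res i => res ++ (pvRow i ++ "\n")) ""
      (l := PySem.List.pyRange 0 (n + 1))
      (by
        intro res i _
        dsimp only
        rw [foldl_strglue]
        simp [pvRow, String.append_assoc])
  rw [hext, foldl_strglue]
  simp

-- B's loop invariant: the running prefix is the last row, the list holds all rows so far
theorem alt_fold_inv (m : Nat) :
    (PySem.List.pyRange 0 (m : Int)).foldl
      (fun (st : String × List String) i =>
        let cur := if 0 < i then st.1 ++ (PySem.Int.toStr i ++ " ") else st.1
        (cur, st.2 ++ [cur ++ "\n"]))
      ("", []) =
    (pvRow ((m : Int) - 1),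
     (PySem.List.pyRange 0 (m : Int)).map (fun i => pvRow i ++ "\n")) := by
  induction m with
  | zero =>
      simp [PySem.List.pyRange_one_eq_nil (by omega : (0:Int) ≤ 0), pvRow, join0_nil]
  | succ k ih =>
      have hsplit : PySem.List.pyRange 0 ((k + 1 : Nat) : Int)
          = PySem.List.pyRange 0 (k : Int) ++ [(k : Int)] := by
        push_cast
        exact PySem.List.pyRange_one_succ_right (by positivity)
      rw [hsplit, List.foldl_append, ih, List.map_append]
      by_cases hk : 0 < (k : Int)
      · have hrow : pvRow ((k : Int) - 1) ++ (PySem.Int.toStr (k : Int) ++ " ") = pvRow (k : Int) :=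
          (pvRow_succ (k : Int) hk).symm
        have hc : ((k + 1 : Nat) : Int) - 1 = (k : Int) := by push_cast; ring
        have hk' : ¬ (k = 0) := by omega
        simp [hrow, hk']
      · have hk0 : (k : Int) = 0 := by omega
        simp [hk0, pvRow, PySem.List.pyRange_one_eq_nil (le_refl (0:Int)), join0_nil]

theorem imprimir_alt_eq_join (n : Int) :
    imprimir_alt n = PySem.Str.join ""
      ((PySem.List.pyRange 0 (n + 1)).map (fun i => pvRow i ++ "\n")) := by
  unfold imprimir_alt
  by_cases h : 0 ≤ n + 1
  · have hm : (n + 1) = ((n + 1).toNat : Int) := by omega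
    rw [hm, alt_fold_inv]
  · rw [PySem.List.pyRange_one_eq_nil (by omega)]
    simp [join0_nil]

-- ===== VERDICT (by name: the statement is the Claim_ definition above) =====
theorem imprimir_spec : Claim_equal_imprimir := by
  intro n _
  unfold Spec_imprimir
  rw [imprimir_eq_join, imprimir_alt_eq_join]
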